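-- pv_equiv track=rewrite | github.com/k-walter/Codes | AOC/2020/14.py | parseBitmask
-- ===== SOURCE A (Python) =====
-- from typing import List, Tuple, Dict, Generator
--
-- def parseBitmask(val: str) -> Tuple[int, int]:
--     zero, one = 0, 0
--     for cur, ch in enumerate(reversed(val)):
--         if ch == 'X':
--             continue
--         elif ch == '1':
--             one |= (1 << cur)
--         elif ch == '0':
--             zero |= (1 << cur)
--     return zero, one
-- ===== SOURCE B (Python) =====
-- def parseBitmask(val: str):
--     s1 = ''.join('1' if c == '1' else '0' for c in val)
--     s0 = ''.join('1' if c == '0' else '0' for c in val)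
--     one = int(s1, 2) if s1 else 0
--     zero = int(s0, 2) if s0 else 0
--     return zero, one
-- ===== Notes on version B (the rewrite author's own statement) =====
-- stated objective: idiomatic
-- what changed: B builds the two masks in closed form by mapping the string to binary-digit strings and converting with int(s,2), instead of A's enumerate-reversed loop or-ing shifted bits one position at a time.
import Mathlib
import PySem

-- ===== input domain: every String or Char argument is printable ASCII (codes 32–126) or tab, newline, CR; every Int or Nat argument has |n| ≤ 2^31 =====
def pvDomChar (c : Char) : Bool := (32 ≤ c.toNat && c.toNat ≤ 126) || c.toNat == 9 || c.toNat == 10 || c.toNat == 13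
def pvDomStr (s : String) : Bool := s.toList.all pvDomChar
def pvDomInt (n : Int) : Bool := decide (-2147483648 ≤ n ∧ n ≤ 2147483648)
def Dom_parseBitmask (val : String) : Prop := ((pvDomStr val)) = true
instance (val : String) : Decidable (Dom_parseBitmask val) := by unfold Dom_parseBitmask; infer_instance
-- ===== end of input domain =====

-- B computes each mask in closed form via binary-string conversion (int(s,2)) instead of A's
-- shifting/or-ing loop over reversed positions; objective: idiomatic. Proven equal on all inputs.


-- ===== PORT A =====
-- the for-loop over enumerate(reversed(val)) as structural recursion on the reversed char list
def pvLoopA : List Char → Nat → Int → Int → Int × Int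
  | [], _, zero, one => (zero, one)
  | ch :: rest, cur, zero, one =>
    if ch = 'X' then pvLoopA rest (cur + 1) zero one
    else if ch = '1' then pvLoopA rest (cur + 1) zero (Int.lor one ((1 : Int) <<< (cur : Nat)))
    else if ch = '0' then pvLoopA rest (cur + 1) (Int.lor zero ((1 : Int) <<< (cur : Nat))) one
    else pvLoopA rest (cur + 1) zero one

def parseBitmask (val : String) : Int × Int :=
  pvLoopA val.toList.reverse 0 0 0

-- ===== PORT B =====
-- int(s, 2) ported by hand as the standard base-2 accumulation; exact on strings of '0'/'1' digits,
-- which is the only way B calls it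
def pvInt2 (s : List Char) : Int :=
  s.foldl (fun a c => 2 * a + (if c = '1' then 1 else 0)) 0

def parseBitmask_alt (val : String) : Int × Int :=
  let s1 := val.toList.map (fun c => if c = '1' then '1' else '0')
  let s0 := val.toList.map (fun c => if c = '0' then '1' else '0')
  let one := if s1.isEmpty then 0 else pvInt2 s1
  let zero := if s0.isEmpty then 0 else pvInt2 s0
  (zero, one)

-- ===== PRECONDITION & SPEC =====
def Spec_parseBitmask (val : String) (out : Int × Int) : Prop := out = parseBitmask_alt val
instance (val : String) (out : Int × Int) : Decidable (Spec_parseBitmask val out) := by unfold Spec_parseBitmask; infer_instance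

-- ===== CLAIM (what is proved, stated in full; the proofs are below) =====
def Claim_equal_parseBitmask : Prop := ∀ (val : String), Dom_parseBitmask val → Spec_parseBitmask val (parseBitmask val)

-- ===== LEMMAS AND PROOFS =====

-- value of a char list read as base-2, taking char t as digit 1
def pvNval (t : Char) (l : List Char) : Nat :=
  l.foldl (fun a c => 2 * a + (if c = t then 1 else 0)) 0

theorem pvNval_append (t : Char) (l : List Char) (c : Char) :
    pvNval t (l ++ [c]) = 2 * pvNval t l + (if c = t then 1 else 0) := by
  simp [pvNval, List.foldl_append]

theorem int_lor_cast (a b : Nat) : Int.lor (a : Int) (b : Int) = ((a ||| b : Nat) : Int) := rfl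

theorem lor_pow_of_lt (o c : Nat) (h : o < 2 ^ c) : o ||| 2 ^ c = o + 2 ^ c := by
  have h2 := Nat.two_pow_add_eq_or_of_lt (i := c) h 1
  rw [Nat.mul_one] at h2
  rw [Nat.lor_comm, ← h2, Nat.add_comm]

theorem shift_eq_pow (n : Nat) : (1 : Int) <<< (n : Nat) = ((2 ^ n : Nat) : Int) := by
  simp [Int.shiftLeft_eq]

theorem pvLoopA_eq (r : List Char) : ∀ (cur z o : Nat), z < 2 ^ cur → o < 2 ^ cur →
    pvLoopA r cur (z : Int) (o : Int) =
      (((z + pvNval '0' r.reverse * 2 ^ cur : Nat) : Int),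
       ((o + pvNval '1' r.reverse * 2 ^ cur : Nat) : Int)) := by
  induction r with
  | nil => intro cur z o hz ho; simp [pvLoopA, pvNval]
  | cons ch rest ih =>
    intro cur z o hz ho
    have hpow : 2 ^ (cur + 1) = 2 * 2 ^ cur := by ring
    have hn0 := pvNval_append '0' rest.reverse ch
    have hn1 := pvNval_append '1' rest.reverse ch
    simp only [List.reverse_cons]
    by_cases hX : ch = 'X'
    · have h1 : ch ≠ '1' := by subst hX; decide
      have h0 : ch ≠ '0' := by subst hX; decide
      rw [pvLoopA, if_pos hX, ih (cur + 1) z o (by omega) (by omega), hn0, hn1]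
      rw [if_neg h1, if_neg h0]
      apply Prod.ext <;> · simp only [pow_succ]; congr 1; ring
    · by_cases h1 : ch = '1'
      · rw [pvLoopA, if_neg hX, if_pos h1, shift_eq_pow, int_lor_cast,
            lor_pow_of_lt o cur ho,
            ih (cur + 1) z (o + 2 ^ cur) (by omega) (by omega), hn0, hn1]
        have h0 : ch ≠ '0' := by subst h1; decide
        rw [if_neg h0, if_pos h1]
        apply Prod.ext <;> · simp only [pow_succ]; congr 1; ring
      · by_cases h0 : ch = '0'
        · rw [pvLoopA, if_neg hX, if_neg h1, if_pos h0, shift_eq_pow, int_lor_cast,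
              lor_pow_of_lt z cur hz,
              ih (cur + 1) (z + 2 ^ cur) o (by omega) (by omega), hn0, hn1]
          rw [if_pos h0, if_neg h1]
          apply Prod.ext <;> · simp only [pow_succ]; congr 1; ring
        · rw [pvLoopA, if_neg hX, if_neg h1, if_neg h0,
              ih (cur + 1) z o (by omega) (by omega), hn0, hn1]
          rw [if_neg h1, if_neg h0]
          apply Prod.ext <;> · simp only [pow_succ]; congr 1; ring

theorem pvInt2_map (t : Char) (l : List Char) :
    pvInt2 (l.map (fun c => if c = t then '1' else '0')) = ((pvNval t l : Nat) : Int) := by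
  have key : ∀ (l : List Char) (a : Nat),
      List.foldl (fun x c => 2 * x + (if c = t then 1 else 0)) (a : Int) l =
        ((List.foldl (fun x c => 2 * x + (if c = t then 1 else 0)) a l : Nat) : Int) := by
    intro l
    induction l with
    | nil => intro a; rfl
    | cons c cs ih =>
      intro a
      simp only [List.foldl_cons]
      rw [show (2 * (a : Int) + (if c = t then 1 else 0)) =
            (((2 * a + (if c = t then 1 else 0) : Nat) : Int)) by split <;> push_cast <;> ring]
      exact ih _
  unfold pvInt2 pvNval
  rw [List.foldl_map]
  have harg : (fun (a : Int) (c : Char) => 2 * a + (if (if c = t then '1' else '0') = '1' then 1 else 0))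
      = fun (a : Int) (c : Char) => 2 * a + (if c = t then 1 else 0) := by
    funext a c
    by_cases h : c = t
    · simp [h]
    · rw [if_neg h, if_neg h, if_neg (by decide : ('0' : Char) ≠ '1')]
  rw [harg]
  exact key l 0

-- ===== VERDICT (by name: the statement is the Claim_ definition above) =====
theorem parseBitmask_spec : Claim_equal_parseBitmask := by
  intro val _
  unfold Spec_parseBitmask parseBitmask parseBitmask_alt
  dsimp only
  have h := pvLoopA_eq val.toList.reverse 0 0 0 (by norm_num) (by norm_num)
  simp only [Nat.cast_zero] at h
  rw [h]
  simp only [List.reverse_reverse, pow_zero, Nat.mul_one, Nat.zero_add, List.isEmpty_iff,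
    List.map_eq_nil_iff]
  by_cases hL : val.toList = []
  · simp [hL, pvNval]
  · rw [if_neg hL, if_neg hL, pvInt2_map, pvInt2_map]
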